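-- pv_equiv track=rewrite | github.com/icrphysics/RSStaticCodeChecker | RSStaticCodeChecker/static_code_checker/generated/argument_change_8.py | argumentsRight
-- ===== SOURCE A (Python) =====
-- def argumentsRight(d):
--     args = ["FrameOfReference","ExaminationName","MetaFileName","Modality","FlipZAxis"]
--     too_many = []
--     for keyword in d.get("keywords", []):
--         if keyword.get("arg") in args:
--             args.remove(keyword.get("arg"))
--         else:
--             too_many.append(keyword.get("arg"))
--     if not too_many and not args:
--         return True
--     return (0 if too_many else 3)
-- ===== SOURCE B (Python) =====
-- def argumentsRight(d):
--     required = ["FrameOfReference","ExaminationName","MetaFileName","Modality","FlipZAxis"]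
--     provided = [kw.get("arg") for kw in d.get("keywords", [])]
--     matched = {p for p in provided if p in required}
--     too_many = len(provided) > len(matched)
--     missing = len(matched) < len(required)
--     if not too_many and not missing:
--         return True
--     return 0 if too_many else 3
-- ===== Notes on version B (the rewrite author's own statement) =====
-- stated objective: simpler
-- what changed: Replaces A's stateful loop that consumes a mutable required-args list and accumulates an extras list with a one-shot comprehension: collect the provided arg values, build the set of matched required names, and decide the verdict by comparing cardinalities.
import Mathlib
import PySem

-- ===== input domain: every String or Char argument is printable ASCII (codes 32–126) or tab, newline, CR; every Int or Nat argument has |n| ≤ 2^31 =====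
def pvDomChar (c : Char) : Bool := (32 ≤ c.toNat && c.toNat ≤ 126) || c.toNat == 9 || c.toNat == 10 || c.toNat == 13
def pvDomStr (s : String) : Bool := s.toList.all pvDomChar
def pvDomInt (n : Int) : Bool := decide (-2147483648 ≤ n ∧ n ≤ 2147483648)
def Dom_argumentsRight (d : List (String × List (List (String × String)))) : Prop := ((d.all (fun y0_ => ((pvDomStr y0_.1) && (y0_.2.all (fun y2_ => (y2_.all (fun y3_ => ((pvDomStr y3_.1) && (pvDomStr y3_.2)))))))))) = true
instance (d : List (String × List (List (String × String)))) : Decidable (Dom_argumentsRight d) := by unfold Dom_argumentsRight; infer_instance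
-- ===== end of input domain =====

-- B replaces A's consumption loop over a mutable required-list by a matched-set cardinality
-- comparison (objective: simpler). Python's True is ported as the Int 1.

-- ===== PORT A =====
-- one loop iteration of A: state = (args, too_many); keyword.get("arg") : Option String,
-- and 'None in args' is False in Python since args holds only strings, hence the none branch appends.
def pvStepA (st : List String × List (Option String)) (kw : List (String × String)) :
    List String × List (Option String) :=
  match kw.lookup "arg" with
  | some s =>
      if s ∈ st.1 then
        -- args.remove(s): remove? is 'some' here because of the membership guard, so getD is exact
        ((PySem.List.remove? st.1 s).getD st.1, st.2)
      else (st.1, st.2 ++ [some s])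
  | none => (st.1, st.2 ++ [none])

def argumentsRight (d : List (String × List (List (String × String)))) : Int :=
  let args : List String := ["FrameOfReference","ExaminationName","MetaFileName","Modality","FlipZAxis"]
  let st := ((d.lookup "keywords").getD []).foldl pvStepA (args, ([] : List (Option String)))
  if st.2 = [] ∧ st.1 = [] then 1
  else if ¬ st.2 = [] then 0 else 3

-- ===== PORT B =====
def argumentsRight_alt (d : List (String × List (List (String × String)))) : Int :=
  let required : List String := ["FrameOfReference","ExaminationName","MetaFileName","Modality","FlipZAxis"]
  let provided : List (Option String) :=
    ((d.lookup "keywords").getD []).map (fun kw => kw.lookup "arg")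
  -- {p for p in provided if p in required}: None is never in a list of strings
  let matched : PySem.Set (Option String) :=
    PySem.Set.ofList (provided.filter (fun p => match p with
      | some s => decide (s ∈ required)
      | none => false))
  let too_many : Prop := provided.length > matched.length
  let missing : Prop := matched.length < required.length
  if ¬ too_many ∧ ¬ missing then 1 else if too_many then 0 else 3

-- ===== PRECONDITION & SPEC =====
def Spec_argumentsRight (d : List (String × List (List (String × String)))) (out : Int) : Prop := out = argumentsRight_alt d
instance (d : List (String × List (List (String × String)))) (out : Int) : Decidable (Spec_argumentsRight d out) := by unfold Spec_argumentsRight; infer_instance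

-- ===== CLAIM (what is proved, stated in full; the proofs are below) =====
def Claim_equal_argumentsRight : Prop := ∀ (d : List (String × List (List (String × String)))), Dom_argumentsRight d → Spec_argumentsRight d (argumentsRight d)

-- ===== LEMMAS AND PROOFS =====

-- the provided arg values of a keyword list
def pvProv (kws : List (List (String × String))) : List (Option String) :=
  kws.map (fun kw => kw.lookup "arg")

-- final args of A's loop = initial args minus everything that ever appears among the provided values
theorem pvFoldA_fst (kws : List (List (String × String))) :
    ∀ (args : List String) (tm : List (Option String)), args.Nodup →
      (kws.foldl pvStepA (args, tm)).1
        = args.filter (fun a => decide (¬ some a ∈ pvProv kws)) := by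
  induction kws with
  | nil => intro args tm _; simp [pvProv]
  | cons kw kws ih =>
    intro args tm hnd
    simp only [List.foldl_cons, pvStepA]
    cases hv : kw.lookup "arg" with
    | none =>
      rw [ih args _ hnd]
      apply List.filter_congr
      intro a _; simp [pvProv, hv]
    | some s =>
      dsimp only
      by_cases hs : s ∈ args
      · rw [if_pos hs, PySem.List.remove?_eq_some_erase args s hs, Option.getD_some,
          ih _ _ (hnd.erase s), List.Nodup.erase_eq_filter hnd, List.filter_filter]
        apply List.filter_congr
        intro a _; by_cases has : a = s <;> simp [pvProv, hv, has, Bool.and_comm]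
      · rw [if_neg hs, ih args _ hnd]
        apply List.filter_congr
        intro a ha
        have hne : a ≠ s := fun h => hs (h ▸ ha)
        simp [pvProv, hv, hne]

-- bookkeeping: each keyword either removes one required name or appends one extra
theorem pvFoldA_len (kws : List (List (String × String))) :
    ∀ (args : List String) (tm : List (Option String)),
      (kws.foldl pvStepA (args, tm)).2.length + args.length
        = tm.length + kws.length + (kws.foldl pvStepA (args, tm)).1.length := by
  induction kws with
  | nil => intro args tm; simp
  | cons kw kws ih =>
    intro args tm
    simp only [List.foldl_cons, pvStepA]
    cases hv : kw.lookup "arg" with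
    | none => have := ih args (tm ++ [none]); simp at this ⊢; omega
    | some s =>
      dsimp only
      by_cases hs : s ∈ args
      · rw [if_pos hs, PySem.List.remove?_eq_some_erase args s hs, Option.getD_some]
        have := ih (args.erase s) tm
        have hlen : (args.erase s).length = args.length - 1 := List.length_erase_of_mem hs
        have hpos : 1 ≤ args.length := List.length_pos_of_mem hs
        simp at this ⊢; omega
      · rw [if_neg hs]
        have := ih args (tm ++ [some s]); simp at this ⊢; omega

-- |{p ∈ P | p ∈ req}| (as a set) = number of required names that occur in P
theorem pvMatched_len (req : List String) (P : List (Option String)) (hnd : req.Nodup) :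
    (PySem.Set.ofList (P.filter (fun p => match p with
        | some s => decide (s ∈ req)
        | none => false))).length
      = (req.filter (fun a => decide (some a ∈ P))).length := by
  have hperm : (PySem.Set.ofList (P.filter (fun p => match p with
        | some s => decide (s ∈ req)
        | none => false))).Perm ((req.filter (fun a => decide (some a ∈ P))).map some) := by
    rw [List.perm_ext_iff_of_nodup (PySem.Set.nodup_ofList _)
        ((List.Nodup.filter _ hnd).map (Option.some_injective String))]
    intro x
    simp only [PySem.Set.mem_ofList, List.mem_filter, List.mem_map]
    constructor
    · intro ⟨hxP, hq⟩
      cases x with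
      | none => simp at hq
      | some s =>
        refine ⟨s, ?_, rfl⟩
        simp at hq ⊢
        exact ⟨hq, by simpa using hxP⟩
    · rintro ⟨s, hsm, rfl⟩
      simp at hsm ⊢
      exact ⟨hsm.2, hsm.1⟩
  simpa using hperm.length_eq

-- ===== VERDICT (by name: the statement is the Claim_ definition above) =====
theorem argumentsRight_spec : Claim_equal_argumentsRight := by
  intro d _
  unfold Spec_argumentsRight argumentsRight argumentsRight_alt
  dsimp only
  set kws := (d.lookup "keywords").getD [] with hkws
  set args : List String := ["FrameOfReference","ExaminationName","MetaFileName","Modality","FlipZAxis"] with hargs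
  have hnd : args.Nodup := by decide
  have hfst := pvFoldA_fst kws args [] hnd
  have hlen := pvFoldA_len kws args []
  have hm := pvMatched_len args (pvProv kws) hnd
  have hpart : (args.filter (fun a => decide (¬ some a ∈ pvProv kws))).length
      + (args.filter (fun a => decide (some a ∈ pvProv kws))).length = args.length := by
    simpa [decide_not] using
      (List.length_eq_length_filter_add (l := args) (fun a => decide (¬ some a ∈ pvProv kws))).symm
  have hP : (pvProv kws).length = kws.length := by simp [pvProv]
  set r := kws.foldl pvStepA (args, ([] : List (Option String))) with hr
  have hargslen : args.length = 5 := by rw [hargs]; rfl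
  rw [show (kws.map (fun kw => kw.lookup "arg")) = pvProv kws from rfl, hm]
  have h1 : r.1 = [] ↔ r.1.length = 0 := List.length_eq_zero_iff.symm
  have h2 : r.2 = [] ↔ r.2.length = 0 := List.length_eq_zero_iff.symm
  rw [hfst] at hlen ⊢
  rw [hfst] at h1
  simp only [List.length_nil] at hlen
  simp only [h1, h2]
  split_ifs <;> omega
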